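-- pv_equiv track=rewrite | github.com/tblacerda/skynet | SkynetRev1_5.py | is_1800_15MHz
-- ===== SOURCE A (Python) =====
-- def is_1800_15MHz(cell_name):
--     """Check if the cell name ends with any of the specified strings."""
--     special_endings = ["18-1A",
--                        "18-1B",
--                        "18-1C",
--                        "18-2A",
--                        "18-2B",
--                        "18-2C",
--                        "18-3A",
--                        "18-3B",
--                        "18-3C",
--                        "18-4A",
--                        "18-4B",
--                        "18-4C",
--                        "18-1D",
--                        "18-2D",
--                        "18-3D",
--                        "18-4D"]
--     return any(cell_name.endswith(ending) for ending in special_endings)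
-- ===== SOURCE B (Python) =====
-- def is_1800_15MHz(cell_name):
--     """Check if the cell name ends with '18-' + sector 1-4 + carrier A-D."""
--     if len(cell_name) < 5:
--         return False
--     return (cell_name[-5:-2] == "18-"
--             and cell_name[-2] in "1234"
--             and cell_name[-1] in "ABCD")
-- ===== Notes on version B (the rewrite author's own statement) =====
-- stated objective: simpler
-- what changed: Replaces the any()-loop over a hard-coded 16-element suffix list with a direct positional check of the last five characters ('18-' then a digit 1-4 then a letter A-D).
import Mathlib
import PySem

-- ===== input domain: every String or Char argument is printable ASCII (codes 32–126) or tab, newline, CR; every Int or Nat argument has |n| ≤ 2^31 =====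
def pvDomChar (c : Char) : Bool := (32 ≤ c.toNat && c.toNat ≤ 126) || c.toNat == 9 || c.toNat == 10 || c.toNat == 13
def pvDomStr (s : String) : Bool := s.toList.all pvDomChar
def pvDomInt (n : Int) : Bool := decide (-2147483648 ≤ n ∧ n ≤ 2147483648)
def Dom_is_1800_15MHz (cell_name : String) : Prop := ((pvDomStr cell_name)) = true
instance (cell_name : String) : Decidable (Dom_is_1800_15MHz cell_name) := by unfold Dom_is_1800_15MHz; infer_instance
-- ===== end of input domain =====

-- B replaces A's any() loop over a hard-coded 16-suffix list with a positional check of the last five characters (objective: simpler).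

-- ===== PORT A =====
def is_1800_15MHz (cell_name : String) : Bool :=
  let special_endings : List String :=
    ["18-1A", "18-1B", "18-1C", "18-2A", "18-2B", "18-2C",
     "18-3A", "18-3B", "18-3C", "18-4A", "18-4B", "18-4C",
     "18-1D", "18-2D", "18-3D", "18-4D"]
  special_endings.any (fun ending => PySem.Str.endswith cell_name ending)

-- ===== PORT B =====
-- Python's `cell_name[-2] in "1234"` tests a 1-char string for substring membership;
-- it is ported as char membership in the list of the pattern's chars, exact for 1-char needles.
def is_1800_15MHz_alt (cell_name : String) : Bool :=
  let l := cell_name.toList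
  if l.length < 5 then false
  else
    (PySem.List.slice l (some (-5)) (some (-2)) == "18-".toList)
    && (match PySem.List.pyGet? l (-2) with
        | some c => "1234".toList.contains c
        | none => false)
    && (match PySem.List.pyGet? l (-1) with
        | some c => "ABCD".toList.contains c
        | none => false)

-- ===== PRECONDITION & SPEC =====
def Spec_is_1800_15MHz (cell_name : String) (out : Bool) : Prop := out = is_1800_15MHz_alt cell_name
instance (cell_name : String) (out : Bool) : Decidable (Spec_is_1800_15MHz cell_name out) := by unfold Spec_is_1800_15MHz; infer_instance

-- ===== CLAIM (what is proved, stated in full; the proofs are below) =====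
def Claim_equal_is_1800_15MHz : Prop := ∀ (cell_name : String), Dom_is_1800_15MHz cell_name → Spec_is_1800_15MHz cell_name (is_1800_15MHz cell_name)

-- ===== LEMMAS AND PROOFS =====

theorem pv_slice_last5_to3 (p : List Char) (c1 c2 c3 c4 c5 : Char) :
    PySem.List.slice (p ++ [c1,c2,c3,c4,c5]) (some (-5)) (some (-2)) = [c1,c2,c3] := by
  have h : ((if ((p.length:Int) + 5 ≤ 1) then 0 else ((p.length:Int) + 5 + -2).toNat) - if ((p.length:Int) < 0) then 0 else p.length) = 3 := by
    split_ifs <;> omega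
  simp [PySem.List.slice, PySem.List.clampIdx, h]

theorem pv_get_neg2 (p : List Char) (c1 c2 c3 c4 c5 : Char) :
    PySem.List.pyGet? (p ++ [c1,c2,c3,c4,c5]) (-2) = some c4 := by
  simp [PySem.List.pyGet?, PySem.List.pyIdx?]

theorem pv_get_neg1 (p : List Char) (c1 c2 c3 c4 c5 : Char) :
    PySem.List.pyGet? (p ++ [c1,c2,c3,c4,c5]) (-1) = some c5 := by
  simp [PySem.List.pyGet?, PySem.List.pyIdx?]

theorem pv_main (s : String) : is_1800_15MHz s = is_1800_15MHz_alt s := by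
  simp only [is_1800_15MHz, is_1800_15MHz_alt, PySem.Str.endswith_eq]
  generalize s.toList = l
  rcases Nat.lt_or_ge l.length 5 with h | h
  · rw [if_pos h]
    refine List.any_eq_false.mpr ?_
    intro e he hend
    rw [PySem.Chars.endswith_iff] at hend
    have hle := hend.length_le
    have h5 : e.toList.length = 5 := by fin_cases he <;> decide
    omega
  · rw [if_neg (by omega)]
    obtain ⟨p, t, ht, rfl⟩ : ∃ p t, t.length = 5 ∧ l = p ++ t :=
      ⟨l.take (l.length - 5), l.drop (l.length - 5), by simp; omega, (l.take_append_drop _).symm⟩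
    rcases t with _|⟨c1,_|⟨c2,_|⟨c3,_|⟨c4,_|⟨c5,_|⟨x,t⟩⟩⟩⟩⟩⟩ <;> simp at ht
    rw [Bool.eq_iff_iff]
    simp only [List.any_cons, List.any_nil, Bool.or_eq_true, Bool.and_eq_true, beq_iff_eq,
      pv_slice_last5_to3, pv_get_neg2, pv_get_neg1, Bool.false_eq_true, or_false,
      PySem.Chars.endswith_iff, List.suffix_iff_eq_drop]
    simp
    constructor
    · rintro (⟨rfl,rfl,rfl,rfl,rfl⟩|⟨rfl,rfl,rfl,rfl,rfl⟩|⟨rfl,rfl,rfl,rfl,rfl⟩|⟨rfl,rfl,rfl,rfl,rfl⟩|⟨rfl,rfl,rfl,rfl,rfl⟩|⟨rfl,rfl,rfl,rfl,rfl⟩|⟨rfl,rfl,rfl,rfl,rfl⟩|⟨rfl,rfl,rfl,rfl,rfl⟩|⟨rfl,rfl,rfl,rfl,rfl⟩|⟨rfl,rfl,rfl,rfl,rfl⟩|⟨rfl,rfl,rfl,rfl,rfl⟩|⟨rfl,rfl,rfl,rfl,rfl⟩|⟨rfl,rfl,rfl,rfl,rfl⟩|⟨rfl,rfl,rfl,rfl,rfl⟩|⟨rfl,rfl,rfl,rfl,rfl⟩|⟨rfl,rfl,rfl,rfl,rfl⟩)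 <;> simp
    · rintro ⟨⟨⟨rfl,rfl,rfl⟩, (rfl|rfl|rfl|rfl)⟩, (rfl|rfl|rfl|rfl)⟩ <;> simp

-- ===== VERDICT (by name: the statement is the Claim_ definition above) =====
theorem is_1800_15MHz_spec : Claim_equal_is_1800_15MHz := by
  intro s _
  exact pv_main s
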